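-- pv_equiv track=rewrite | github.com/toroleapinc/encephagen | experiments/17_working_memory.py | classify_regions
-- ===== SOURCE A (Python) =====
-- def classify_regions(labels):
--     groups = {}
--     for key, patterns in [
--         ('visual', ['V1', 'V2', 'VAC']),
--         ('prefrontal', ['PFC', 'FEF']),
--         ('hippocampus', ['HC', 'PHC']),
--         ('temporal', ['TC']),
--         ('parietal', ['PC']),
--         ('cingulate', ['CC']),
--         ('thalamus', ['TM']),
--     ]:
--         groups[key] = [i for i, l in enumerate(labels) if any(p in l.upper() for p in patterns)]
--     return groups
-- ===== SOURCE B (Python) =====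
-- PATTERN_INDEX = {
--     'V1': 'visual', 'V2': 'visual', 'VAC': 'visual',
--     'PFC': 'prefrontal', 'FEF': 'prefrontal',
--     'HC': 'hippocampus', 'PHC': 'hippocampus',
--     'TC': 'temporal', 'PC': 'parietal', 'CC': 'cingulate', 'TM': 'thalamus',
-- }
-- GROUP_KEYS = ['visual', 'prefrontal', 'hippocampus', 'temporal',
--               'parietal', 'cingulate', 'thalamus']
--
-- def classify_regions(labels):
--     groups = {key: [] for key in GROUP_KEYS}
--     for i, l in enumerate(labels):
--         up = l.upper()
--         hit = set()
--         for w in (2, 3):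
--             for j in range(len(up) - w + 1):
--                 g = PATTERN_INDEX.get(up[j:j + w])
--                 if g is not None:
--                     hit.add(g)
--         for key in GROUP_KEYS:
--             if key in hit:
--                 groups[key].append(i)
--     return groups
-- ===== Notes on version B (the rewrite author's own statement) =====
-- stated objective: faster
-- what changed: A runs seven independent passes over labels, each substring-searching every group pattern in the re-uppercased label; B inverts the data structure: a precomputed pattern->group hash index, one pass over labels that slides the 2- and 3-character windows of the once-uppercased label and looks each window up in the index to collect the set of matching groups, then appends the index into the pre-seeded groups dict.
import Mathlib
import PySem

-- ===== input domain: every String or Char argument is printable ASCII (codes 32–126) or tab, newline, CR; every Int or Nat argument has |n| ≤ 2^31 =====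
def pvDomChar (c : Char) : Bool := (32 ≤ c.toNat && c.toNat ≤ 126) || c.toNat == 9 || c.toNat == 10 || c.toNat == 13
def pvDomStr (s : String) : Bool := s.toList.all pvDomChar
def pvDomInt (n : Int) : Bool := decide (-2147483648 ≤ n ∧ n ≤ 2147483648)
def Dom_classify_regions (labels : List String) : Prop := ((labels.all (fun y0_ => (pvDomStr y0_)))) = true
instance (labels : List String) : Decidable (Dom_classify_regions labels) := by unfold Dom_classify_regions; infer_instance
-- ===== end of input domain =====

-- A does one full pass over labels per group, substring-searching every pattern in each
-- re-uppercased label; B instead looks each 2-/3-char window of the once-uppercased label up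
-- in a precomputed pattern->group index, one pass; objective: alternative algorithm.

-- ===== PORT A =====
-- A's dict: groups[key] = [i for i, l in enumerate(labels) if any(p in l.upper() for p in patterns)]
def classify_regions (labels : List String) : List (String × List Int) :=
  (([(("visual" : String), ["V1", "V2", "VAC"]),
     ("prefrontal", ["PFC", "FEF"]),
     ("hippocampus", ["HC", "PHC"]),
     ("temporal", ["TC"]),
     ("parietal", ["PC"]),
     ("cingulate", ["CC"]),
     ("thalamus", ["TM"])] : List (String × List String)).foldl
    (fun d kp => d.insert kp.1
      (((PySem.List.enumerate labels 0).filter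
          (fun il => kp.2.any (fun p => PySem.Str.isIn p (PySem.Str.upper il.2)))).map (fun il => il.1)))
    PySem.Dict.empty).items

-- ===== PORT B =====
-- Source B's module constants PATTERN_INDEX and GROUP_KEYS
def pvPatternIndex : PySem.Dict String String :=
  PySem.Dict.mk
    [("V1", "visual"), ("V2", "visual"), ("VAC", "visual"),
     ("PFC", "prefrontal"), ("FEF", "prefrontal"),
     ("HC", "hippocampus"), ("PHC", "hippocampus"),
     ("TC", "temporal"), ("PC", "parietal"), ("CC", "cingulate"), ("TM", "thalamus")]

def pvGroupKeys : List String :=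
  ["visual", "prefrontal", "hippocampus", "temporal", "parietal", "cingulate", "thalamus"]

-- Source B's inner `hit` set: slide windows of width 2 and 3 over `up`, look each up in the index
def pvHit (up : String) : PySem.Set String :=
  ([2, 3] : List Int).foldl
    (fun hit w =>
      (PySem.List.pyRange 0 (PySem.Str.len up - w + 1)).foldl
        (fun hit j =>
          match pvPatternIndex.get? (PySem.Str.slice up (some j) (some (j + w))) with
          | some g => PySem.Set.add hit g
          | none => hit)
        hit)
    (PySem.Set.ofList [])

def classify_regions_alt (labels : List String) : List (String × List Int) :=
  -- groups = {key: [] for key in GROUP_KEYS}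
  let groups0 := pvGroupKeys.foldl (fun d k => d.insert k ([] : List Int)) PySem.Dict.empty
  -- for i, l in enumerate(labels): up = l.upper(); hit = …; for key in GROUP_KEYS: if key in hit: append i
  ((PySem.List.enumerate labels 0).foldl
    (fun d il =>
      let hit := pvHit (PySem.Str.upper il.2)
      pvGroupKeys.foldl
        (fun d k =>
          if PySem.Set.contains hit k then
            d.modify k ([] : List Int) (fun xs => xs ++ [il.1])
          else d)
        d)
    groups0).items

-- ===== PRECONDITION & SPEC =====
def Spec_classify_regions (labels : List String) (out : List (String × List Int)) : Prop := out = classify_regions_alt labels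
instance (labels : List String) (out : List (String × List Int)) : Decidable (Spec_classify_regions labels out) := by unfold Spec_classify_regions; infer_instance

-- ===== CLAIM (what is proved, stated in full; the proofs are below) =====
def Claim_equal_classify_regions : Prop := ∀ (labels : List String), Dom_classify_regions labels → Spec_classify_regions labels (classify_regions labels)

-- ===== LEMMAS AND PROOFS =====

-- membership in B's `hit`-building fold over one window width
theorem pvMem_foldl_addOpt (f : Int → Option String) (x : String) :
    ∀ (js : List Int) (s : PySem.Set String),
    (x ∈ js.foldl
        (fun st j => match f j with | some g => PySem.Set.add st g | none => st) s)
      ↔ x ∈ s ∨ ∃ j ∈ js, f j = some x := by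
  intro js
  induction js with
  | nil => intro s; simp
  | cons j js ih =>
      intro s
      simp only [List.foldl_cons]
      rw [ih]
      cases h : f j with
      | none => simp [h]
      | some g =>
          simp only [PySem.Set.mem_add, List.mem_cons]
          constructor
          · rintro (⟨hs | hg⟩ | ⟨j', hj', hf⟩)
            · exact Or.inl hs
            · exact Or.inr ⟨j, Or.inl rfl, hg ▸ h⟩
            · exact Or.inr ⟨j', Or.inr hj', hf⟩
          · rintro (hs | ⟨j', hj' | hj', hf⟩)
            · exact Or.inl (Or.inl hs)
            · subst hj'; rw [h] at hf; exact Or.inl (Or.inr (Option.some.inj hf).symm)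
            · exact Or.inr ⟨j', hj', hf⟩

-- a width-w window of s equals p (|p| = w) at some valid offset iff p is a substring of s
theorem pvWindow_iff (p s : List Char) (w : Int) (hw : 0 < w) (hL : (p.length : Int) = w) :
    (∃ j : Int, (0 ≤ j ∧ j < (s.length : Int) - w + 1)
        ∧ PySem.List.slice s (some j) (some (j + w)) = p)
      ↔ PySem.Chars.isIn p s = true := by
  rw [← PySem.Chars.exists_prefix_drop_iff_isIn]
  constructor
  · rintro ⟨j, ⟨hj0, hjlt⟩, hslice⟩
    refine ⟨j.toNat, ?_⟩
    rw [PySem.List.slice_toNat s hj0 (by omega)] at hslice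
    have hww : (j + w).toNat - j.toNat = w.toNat := by omega
    rw [hww] at hslice
    rw [List.prefix_iff_eq_take]
    have : p.length = w.toNat := by omega
    rw [this, ← hslice]
  · rintro ⟨m, hpre⟩
    have hlen : p.length ≤ (s.drop m).length := hpre.length_le
    rw [List.length_drop] at hlen
    have hmle : m + w.toNat ≤ s.length := by omega
    refine ⟨(m : Int), ⟨by positivity, by omega⟩, ?_⟩
    rw [PySem.List.slice_toNat s (by positivity) (by omega)]
    have h1 : ((m : Int) + w).toNat - ((m : Int)).toNat = w.toNat := by omega
    have h2 : ((m : Int)).toNat = m := by omega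
    rw [h1, h2]
    rw [List.prefix_iff_eq_take] at hpre
    have : p.length = w.toNat := by omega
    rw [this] at hpre
    exact hpre.symm

-- string level, with B's pyRange of offsets
theorem pvExistsWin (up p : String) (w : Int) (hw : 0 < w)
    (hL : (p.toList.length : Int) = w) :
    (∃ j ∈ PySem.List.pyRange 0 (PySem.Str.len up - w + 1),
        PySem.Str.slice up (some j) (some (j + w)) = p)
      ↔ PySem.Str.isIn p up = true := by
  rw [PySem.Str.isIn_eq, ← pvWindow_iff p.toList up.toList w hw hL]
  constructor
  · rintro ⟨j, hj, hs⟩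
    rw [PySem.List.mem_pyRange_one] at hj
    refine ⟨j, ⟨hj.1, ?_⟩, ?_⟩
    · have := hj.2; rw [PySem.Str.len_eq] at this; omega
    · rw [← hs]
      simp [PySem.Str.toList_slice, PySem.Chars.slice_eq_listSlice]
  · rintro ⟨j, ⟨hj0, hjlt⟩, hs⟩
    refine ⟨j, ?_, ?_⟩
    · rw [PySem.List.mem_pyRange_one, PySem.Str.len_eq]
      exact ⟨hj0, by omega⟩
    · apply String.toList_inj.mp
      rw [← hs]
      simp [PySem.Str.toList_slice, PySem.Chars.slice_eq_listSlice]

-- a window of the wrong width never equals p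
theorem pvNoWin (up p : String) (w : Int) (hw : 0 ≤ w)
    (hL : (p.toList.length : Int) ≠ w) :
    (∃ j ∈ PySem.List.pyRange 0 (PySem.Str.len up - w + 1),
        PySem.Str.slice up (some j) (some (j + w)) = p)
      ↔ False := by
  simp only [iff_false]
  rintro ⟨j, hj, hs⟩
  rw [PySem.List.mem_pyRange_one, PySem.Str.len_eq] at hj
  apply hL
  rw [← hs]
  rw [show (PySem.Str.slice up (some j) (some (j + w))).toList
        = PySem.List.slice up.toList (some j) (some (j + w)) from
      (PySem.Str.toList_slice up (some j) (some (j + w))).trans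
        (PySem.Chars.slice_eq_listSlice up.toList (some j) (some (j + w)))]
  rw [PySem.List.slice_toNat up.toList hj.1 (by omega)]
  simp only [List.length_take, List.length_drop]
  omega

theorem pvMem_hit (up : String) (x : String) :
    x ∈ pvHit up
      ↔ (∃ j ∈ PySem.List.pyRange 0 (PySem.Str.len up - 2 + 1),
            pvPatternIndex.get? (PySem.Str.slice up (some j) (some (j + 2))) = some x)
        ∨ (∃ j ∈ PySem.List.pyRange 0 (PySem.Str.len up - 3 + 1),
            pvPatternIndex.get? (PySem.Str.slice up (some j) (some (j + 3))) = some x) := by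
  simp only [pvHit, List.foldl_cons, List.foldl_nil]
  rw [pvMem_foldl_addOpt, pvMem_foldl_addOpt]
  simp [PySem.Set.ofList]


-- first-match lookup in the literal pattern index, per group
set_option maxHeartbeats 1000000 in
theorem pvGet_visual (win : String) :
    pvPatternIndex.get? win = some "visual" ↔ (win = "V1" ∨ win = "V2" ∨ win = "VAC") := by
  simp only [pvPatternIndex, PySem.Dict.get?_mk_cons, beq_iff_eq]
  split_ifs <;> (try subst_vars) <;> simp_all [PySem.Dict.get?, eq_comm]

set_option maxHeartbeats 1000000 in
theorem pvGet_prefrontal (win : String) :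
    pvPatternIndex.get? win = some "prefrontal" ↔ (win = "PFC" ∨ win = "FEF") := by
  simp only [pvPatternIndex, PySem.Dict.get?_mk_cons, beq_iff_eq]
  split_ifs <;> (try subst_vars) <;> simp_all [PySem.Dict.get?, eq_comm]

set_option maxHeartbeats 1000000 in
theorem pvGet_hippocampus (win : String) :
    pvPatternIndex.get? win = some "hippocampus" ↔ (win = "HC" ∨ win = "PHC") := by
  simp only [pvPatternIndex, PySem.Dict.get?_mk_cons, beq_iff_eq]
  split_ifs <;> (try subst_vars) <;> simp_all [PySem.Dict.get?, eq_comm]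

set_option maxHeartbeats 1000000 in
theorem pvGet_temporal (win : String) :
    pvPatternIndex.get? win = some "temporal" ↔ win = "TC" := by
  simp only [pvPatternIndex, PySem.Dict.get?_mk_cons, beq_iff_eq]
  split_ifs <;> (try subst_vars) <;> simp_all [PySem.Dict.get?, eq_comm]

set_option maxHeartbeats 1000000 in
theorem pvGet_parietal (win : String) :
    pvPatternIndex.get? win = some "parietal" ↔ win = "PC" := by
  simp only [pvPatternIndex, PySem.Dict.get?_mk_cons, beq_iff_eq]
  split_ifs <;> (try subst_vars) <;> simp_all [PySem.Dict.get?, eq_comm]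

set_option maxHeartbeats 1000000 in
theorem pvGet_cingulate (win : String) :
    pvPatternIndex.get? win = some "cingulate" ↔ win = "CC" := by
  simp only [pvPatternIndex, PySem.Dict.get?_mk_cons, beq_iff_eq]
  split_ifs <;> (try subst_vars) <;> simp_all [PySem.Dict.get?, eq_comm]

set_option maxHeartbeats 1000000 in
theorem pvGet_thalamus (win : String) :
    pvPatternIndex.get? win = some "thalamus" ↔ win = "TM" := by
  simp only [pvPatternIndex, PySem.Dict.get?_mk_cons, beq_iff_eq]
  split_ifs <;> (try subst_vars) <;> simp_all [PySem.Dict.get?, eq_comm]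

-- `hit` membership per group key = A's substring condition
theorem pvHit_visual (up : String) :
    PySem.Set.contains (pvHit up) "visual"
      = (["V1", "V2", "VAC"] : List String).any (fun p => PySem.Str.isIn p up) := by
  rw [Bool.eq_iff_iff, PySem.Set.contains_iff, pvMem_hit]
  simp only [pvGet_visual, and_or_left, exists_or,
    pvExistsWin up "V1" 2 (by norm_num) (by decide),
    pvExistsWin up "V2" 2 (by norm_num) (by decide),
    pvNoWin up "VAC" 2 (by norm_num) (by decide),
    pvNoWin up "V1" 3 (by norm_num) (by decide),
    pvNoWin up "V2" 3 (by norm_num) (by decide),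
    pvExistsWin up "VAC" 3 (by norm_num) (by decide),
    List.any_cons, List.any_nil, Bool.or_eq_true, or_false, false_or]
  tauto

theorem pvHit_prefrontal (up : String) :
    PySem.Set.contains (pvHit up) "prefrontal"
      = (["PFC", "FEF"] : List String).any (fun p => PySem.Str.isIn p up) := by
  rw [Bool.eq_iff_iff, PySem.Set.contains_iff, pvMem_hit]
  simp only [pvGet_prefrontal, and_or_left, exists_or,
    pvNoWin up "PFC" 2 (by norm_num) (by decide),
    pvNoWin up "FEF" 2 (by norm_num) (by decide),
    pvExistsWin up "PFC" 3 (by norm_num) (by decide),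
    pvExistsWin up "FEF" 3 (by norm_num) (by decide),
    List.any_cons, List.any_nil, Bool.or_eq_true, or_false, false_or]
  tauto

theorem pvHit_hippocampus (up : String) :
    PySem.Set.contains (pvHit up) "hippocampus"
      = (["HC", "PHC"] : List String).any (fun p => PySem.Str.isIn p up) := by
  rw [Bool.eq_iff_iff, PySem.Set.contains_iff, pvMem_hit]
  simp only [pvGet_hippocampus, and_or_left, exists_or,
    pvExistsWin up "HC" 2 (by norm_num) (by decide),
    pvNoWin up "PHC" 2 (by norm_num) (by decide),
    pvNoWin up "HC" 3 (by norm_num) (by decide),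
    pvExistsWin up "PHC" 3 (by norm_num) (by decide),
    List.any_cons, List.any_nil, Bool.or_eq_true, or_false, false_or]
  tauto

theorem pvHit_temporal (up : String) :
    PySem.Set.contains (pvHit up) "temporal"
      = (["TC"] : List String).any (fun p => PySem.Str.isIn p up) := by
  rw [Bool.eq_iff_iff, PySem.Set.contains_iff, pvMem_hit]
  simp only [pvGet_temporal,
    pvExistsWin up "TC" 2 (by norm_num) (by decide),
    pvNoWin up "TC" 3 (by norm_num) (by decide),
    List.any_cons, List.any_nil, Bool.or_eq_true, or_false]
  tauto

theorem pvHit_parietal (up : String) :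
    PySem.Set.contains (pvHit up) "parietal"
      = (["PC"] : List String).any (fun p => PySem.Str.isIn p up) := by
  rw [Bool.eq_iff_iff, PySem.Set.contains_iff, pvMem_hit]
  simp only [pvGet_parietal,
    pvExistsWin up "PC" 2 (by norm_num) (by decide),
    pvNoWin up "PC" 3 (by norm_num) (by decide),
    List.any_cons, List.any_nil, Bool.or_eq_true, or_false]
  tauto

theorem pvHit_cingulate (up : String) :
    PySem.Set.contains (pvHit up) "cingulate"
      = (["CC"] : List String).any (fun p => PySem.Str.isIn p up) := by
  rw [Bool.eq_iff_iff, PySem.Set.contains_iff, pvMem_hit]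
  simp only [pvGet_cingulate,
    pvExistsWin up "CC" 2 (by norm_num) (by decide),
    pvNoWin up "CC" 3 (by norm_num) (by decide),
    List.any_cons, List.any_nil, Bool.or_eq_true, or_false]
  tauto

theorem pvHit_thalamus (up : String) :
    PySem.Set.contains (pvHit up) "thalamus"
      = (["TM"] : List String).any (fun p => PySem.Str.isIn p up) := by
  rw [Bool.eq_iff_iff, PySem.Set.contains_iff, pvMem_hit]
  simp only [pvGet_thalamus,
    pvExistsWin up "TM" 2 (by norm_num) (by decide),
    pvNoWin up "TM" 3 (by norm_num) (by decide),
    List.any_cons, List.any_nil, Bool.or_eq_true, or_false]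
  tauto

-- indices (from enumerate labels n) whose label matches one of the patterns
def pvIdx (ps : List String) (labels : List String) (n : Int) : List Int :=
  ((PySem.List.enumerate labels n).filter
      (fun il => ps.any (fun p => PySem.Str.isIn p (PySem.Str.upper il.2)))).map (fun il => il.1)

def mkD (a1 a2 a3 a4 a5 a6 a7 : List Int) : PySem.Dict String (List Int) :=
  PySem.Dict.mk [("visual", a1), ("prefrontal", a2), ("hippocampus", a3), ("temporal", a4),
    ("parietal", a5), ("cingulate", a6), ("thalamus", a7)]

theorem pvIdx_nil (ps : List String) (n : Int) : pvIdx ps [] n = [] := by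
  simp [pvIdx, PySem.List.enumerate_nil]

theorem pvIdx_cons (ps : List String) (l : String) (ls : List String) (n : Int) :
    pvIdx ps (l :: ls) n
      = (if ps.any (fun p => PySem.Str.isIn p (PySem.Str.upper l)) then [n] else [])
        ++ pvIdx ps ls (n + 1) := by
  simp only [pvIdx, PySem.List.enumerate_cons, List.filter_cons]
  split_ifs <;> simp

theorem cond1 (b : Bool) (i : Int) (a1 a2 a3 a4 a5 a6 a7 : List Int) :
    (if b then (mkD a1 a2 a3 a4 a5 a6 a7).modify "visual" [] (fun xs => xs ++ [i])
     else mkD a1 a2 a3 a4 a5 a6 a7)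
    = mkD (a1 ++ if b then [i] else []) a2 a3 a4 a5 a6 a7 := by
  cases b <;> simp [mkD, PySem.Dict.modify, PySem.Dict.insert, PySem.Dict.contains,
    PySem.Dict.getD, PySem.Dict.get?]

theorem cond2 (b : Bool) (i : Int) (a1 a2 a3 a4 a5 a6 a7 : List Int) :
    (if b then (mkD a1 a2 a3 a4 a5 a6 a7).modify "prefrontal" [] (fun xs => xs ++ [i])
     else mkD a1 a2 a3 a4 a5 a6 a7)
    = mkD a1 (a2 ++ if b then [i] else []) a3 a4 a5 a6 a7 := by
  cases b <;> simp [mkD, PySem.Dict.modify, PySem.Dict.insert, PySem.Dict.contains,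
    PySem.Dict.getD, PySem.Dict.get?]

theorem cond3 (b : Bool) (i : Int) (a1 a2 a3 a4 a5 a6 a7 : List Int) :
    (if b then (mkD a1 a2 a3 a4 a5 a6 a7).modify "hippocampus" [] (fun xs => xs ++ [i])
     else mkD a1 a2 a3 a4 a5 a6 a7)
    = mkD a1 a2 (a3 ++ if b then [i] else []) a4 a5 a6 a7 := by
  cases b <;> simp [mkD, PySem.Dict.modify, PySem.Dict.insert, PySem.Dict.contains,
    PySem.Dict.getD, PySem.Dict.get?]

theorem cond4 (b : Bool) (i : Int) (a1 a2 a3 a4 a5 a6 a7 : List Int) :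
    (if b then (mkD a1 a2 a3 a4 a5 a6 a7).modify "temporal" [] (fun xs => xs ++ [i])
     else mkD a1 a2 a3 a4 a5 a6 a7)
    = mkD a1 a2 a3 (a4 ++ if b then [i] else []) a5 a6 a7 := by
  cases b <;> simp [mkD, PySem.Dict.modify, PySem.Dict.insert, PySem.Dict.contains,
    PySem.Dict.getD, PySem.Dict.get?]

theorem cond5 (b : Bool) (i : Int) (a1 a2 a3 a4 a5 a6 a7 : List Int) :
    (if b then (mkD a1 a2 a3 a4 a5 a6 a7).modify "parietal" [] (fun xs => xs ++ [i])
     else mkD a1 a2 a3 a4 a5 a6 a7)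
    = mkD a1 a2 a3 a4 (a5 ++ if b then [i] else []) a6 a7 := by
  cases b <;> simp [mkD, PySem.Dict.modify, PySem.Dict.insert, PySem.Dict.contains,
    PySem.Dict.getD, PySem.Dict.get?]

theorem cond6 (b : Bool) (i : Int) (a1 a2 a3 a4 a5 a6 a7 : List Int) :
    (if b then (mkD a1 a2 a3 a4 a5 a6 a7).modify "cingulate" [] (fun xs => xs ++ [i])
     else mkD a1 a2 a3 a4 a5 a6 a7)
    = mkD a1 a2 a3 a4 a5 (a6 ++ if b then [i] else []) a7 := by
  cases b <;> simp [mkD, PySem.Dict.modify, PySem.Dict.insert, PySem.Dict.contains,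
    PySem.Dict.getD, PySem.Dict.get?]

theorem cond7 (b : Bool) (i : Int) (a1 a2 a3 a4 a5 a6 a7 : List Int) :
    (if b then (mkD a1 a2 a3 a4 a5 a6 a7).modify "thalamus" [] (fun xs => xs ++ [i])
     else mkD a1 a2 a3 a4 a5 a6 a7)
    = mkD a1 a2 a3 a4 a5 a6 (a7 ++ if b then [i] else []) := by
  cases b <;> simp [mkD, PySem.Dict.modify, PySem.Dict.insert, PySem.Dict.contains,
    PySem.Dict.getD, PySem.Dict.get?]

-- one step of B's per-label loop on the literal 7-key dict
theorem pvStep (i : Int) (l : String) (a1 a2 a3 a4 a5 a6 a7 : List Int) :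
    pvGroupKeys.foldl
      (fun d k =>
        if PySem.Set.contains (pvHit (PySem.Str.upper l)) k then
          d.modify k ([] : List Int) (fun xs => xs ++ [i])
        else d)
      (mkD a1 a2 a3 a4 a5 a6 a7)
    = mkD (a1 ++ if (["V1","V2","VAC"] : List String).any (fun p => PySem.Str.isIn p (PySem.Str.upper l)) then [i] else [])
          (a2 ++ if (["PFC","FEF"] : List String).any (fun p => PySem.Str.isIn p (PySem.Str.upper l)) then [i] else [])
          (a3 ++ if (["HC","PHC"] : List String).any (fun p => PySem.Str.isIn p (PySem.Str.upper l)) then [i] else [])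
          (a4 ++ if (["TC"] : List String).any (fun p => PySem.Str.isIn p (PySem.Str.upper l)) then [i] else [])
          (a5 ++ if (["PC"] : List String).any (fun p => PySem.Str.isIn p (PySem.Str.upper l)) then [i] else [])
          (a6 ++ if (["CC"] : List String).any (fun p => PySem.Str.isIn p (PySem.Str.upper l)) then [i] else [])
          (a7 ++ if (["TM"] : List String).any (fun p => PySem.Str.isIn p (PySem.Str.upper l)) then [i] else []) := by
  simp only [pvGroupKeys, List.foldl_cons, List.foldl_nil]
  rw [pvHit_visual, pvHit_prefrontal, pvHit_hippocampus, pvHit_temporal,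
    pvHit_parietal, pvHit_cingulate, pvHit_thalamus]
  rw [cond1, cond2, cond3, cond4, cond5, cond6, cond7]

-- B's label loop, fully characterised
theorem pvLoop (labels : List String) : ∀ (n : Int) (a1 a2 a3 a4 a5 a6 a7 : List Int),
    (PySem.List.enumerate labels n).foldl
      (fun d il =>
        let hit := pvHit (PySem.Str.upper il.2)
        pvGroupKeys.foldl
          (fun d k =>
            if PySem.Set.contains hit k then
              d.modify k ([] : List Int) (fun xs => xs ++ [il.1])
            else d)
          d)
      (mkD a1 a2 a3 a4 a5 a6 a7)
    = mkD (a1 ++ pvIdx ["V1","V2","VAC"] labels n) (a2 ++ pvIdx ["PFC","FEF"] labels n)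
          (a3 ++ pvIdx ["HC","PHC"] labels n) (a4 ++ pvIdx ["TC"] labels n)
          (a5 ++ pvIdx ["PC"] labels n) (a6 ++ pvIdx ["CC"] labels n)
          (a7 ++ pvIdx ["TM"] labels n) := by
  induction labels with
  | nil => intro n a1 a2 a3 a4 a5 a6 a7; simp [PySem.List.enumerate_nil, pvIdx_nil]
  | cons l ls ih =>
      intro n a1 a2 a3 a4 a5 a6 a7
      rw [PySem.List.enumerate_cons, List.foldl_cons]
      show (PySem.List.enumerate ls (n + 1)).foldl _
        (pvGroupKeys.foldl _ (mkD a1 a2 a3 a4 a5 a6 a7)) = _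
      rw [pvStep, ih (n + 1)]
      simp [pvIdx_cons, List.append_assoc]

theorem pvA_eq (labels : List String) :
    classify_regions labels
      = [("visual", pvIdx ["V1","V2","VAC"] labels 0), ("prefrontal", pvIdx ["PFC","FEF"] labels 0),
         ("hippocampus", pvIdx ["HC","PHC"] labels 0), ("temporal", pvIdx ["TC"] labels 0),
         ("parietal", pvIdx ["PC"] labels 0), ("cingulate", pvIdx ["CC"] labels 0),
         ("thalamus", pvIdx ["TM"] labels 0)] := by
  simp [classify_regions, pvIdx, PySem.Dict.insert, PySem.Dict.contains, PySem.Dict.empty]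

theorem pvGroups0_eq :
    pvGroupKeys.foldl (fun d k => d.insert k ([] : List Int)) PySem.Dict.empty
      = mkD [] [] [] [] [] [] [] := by
  decide

theorem pvB_eq (labels : List String) :
    classify_regions_alt labels
      = [("visual", pvIdx ["V1","V2","VAC"] labels 0), ("prefrontal", pvIdx ["PFC","FEF"] labels 0),
         ("hippocampus", pvIdx ["HC","PHC"] labels 0), ("temporal", pvIdx ["TC"] labels 0),
         ("parietal", pvIdx ["PC"] labels 0), ("cingulate", pvIdx ["CC"] labels 0),
         ("thalamus", pvIdx ["TM"] labels 0)] := by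
  show ((PySem.List.enumerate labels 0).foldl _
      (pvGroupKeys.foldl (fun d k => d.insert k ([] : List Int)) PySem.Dict.empty)).items = _
  rw [pvGroups0_eq, pvLoop labels 0]
  simp [mkD]

-- ===== VERDICT (by name: the statement is the Claim_ definition above) =====
theorem classify_regions_spec : Claim_equal_classify_regions := by
  intro labels _
  show classify_regions labels = classify_regions_alt labels
  rw [pvA_eq, pvB_eq]
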